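-- pv_equiv track=rewrite | github.com/sajivfrancis777/IAO-Architecture | scripts/gen_testing_report.py | _inject_page_footers
-- ===== SOURCE A (Python) =====
-- _PAGE_BREAK = '<div style="page-break-before: always;"></div>'
--
-- def _inject_page_footers(rendered: str, title: str) -> str:
--     """Insert page-numbered footers with Back-to-TOC links at every page break."""
--     parts = rendered.split(_PAGE_BREAK)
--     if len(parts) <= 1:
--         return rendered
--     result = []
--     for i, part in enumerate(parts[:-1]):
--         page = i + 1
--         footer = (
--             f'<div class="page-footer">'
--             f'<span>Page {page}</span>'
--             f'<span><a href="#toc">\u2191 Back to TOC</a></span>'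
--             f'<span>{title}</span>'
--             f'</div>\n'
--             f'{_PAGE_BREAK}'
--         )
--         result.append(part + footer)
--     result.append(parts[-1])
--     return "".join(result)
-- ===== SOURCE B (Python) =====
-- _PAGE_BREAK = '<div style="page-break-before: always;"></div>'
--
--
-- def _inject_page_footers(rendered: str, title: str) -> str:
--     """Single streaming scan: find each page break, emit text + footer, advance."""
--     out = ""
--     page = 0
--     rest = rendered
--     while True:
--         i = rest.find(_PAGE_BREAK)
--         if i == -1:
--             return out + rest
--         page += 1
--         out += (
--             rest[:i]
--             + f'<div class="page-footer">'
--             f'<span>Page {page}</span>'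
--             f'<span><a href="#toc">\u2191 Back to TOC</a></span>'
--             f'<span>{title}</span>'
--             f'</div>\n'
--             f'{_PAGE_BREAK}'
--         )
--         rest = rest[i + len(_PAGE_BREAK):]
-- ===== Notes on version B (the rewrite author's own statement) =====
-- stated objective: idiomatic
-- what changed: Replaced split-into-parts-list + enumerate loop + final join with a single streaming scan that finds each page break with str.find, emits the preceding text plus the footer, and advances a page counter (no parts list, no length check, no join).
import Mathlib
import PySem

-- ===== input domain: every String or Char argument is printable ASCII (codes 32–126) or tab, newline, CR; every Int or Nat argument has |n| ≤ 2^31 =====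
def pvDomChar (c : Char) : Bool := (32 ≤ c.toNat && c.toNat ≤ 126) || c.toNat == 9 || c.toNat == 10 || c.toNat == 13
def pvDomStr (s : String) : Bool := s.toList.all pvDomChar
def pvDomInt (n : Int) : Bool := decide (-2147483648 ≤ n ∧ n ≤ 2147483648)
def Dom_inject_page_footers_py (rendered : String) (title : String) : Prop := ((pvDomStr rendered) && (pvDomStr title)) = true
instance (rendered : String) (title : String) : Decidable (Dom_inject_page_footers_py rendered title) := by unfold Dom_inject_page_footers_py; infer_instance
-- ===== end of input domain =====

-- B replaces A's split/enumerate/join over a parts list by a single streaming scan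
-- (find next page break, emit text + footer, advance a counter); objective: idiomatic, no speed claim.

-- _PAGE_BREAK (module constant, shared by both programs)
def pvPB : List Char := "<div style=\"page-break-before: always;\"></div>".toList

-- the footer f-string of both programs (it ends with _PAGE_BREAK in both)
def pvFooter (title : String) (page : Int) : List Char :=
  "<div class=\"page-footer\"><span>Page ".toList ++ PySem.Int.toChars page
    ++ "</span><span><a href=\"#toc\">↑ Back to TOC</a></span><span>".toList
    ++ title.toList ++ "</span></div>\n".toList ++ pvPB

-- ===== PORT A =====
def inject_page_footers_py (rendered : String) (title : String) : String :=
  let parts := PySem.Chars.splitOn rendered.toList pvPB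
  if parts.length ≤ 1 then rendered
  else
    -- result = [part + footer for i, part in enumerate(parts[:-1])]; result.append(parts[-1]); "".join(result)
    String.ofList (PySem.Chars.join []
      ((PySem.List.enumerate (PySem.List.slice parts none (some (-1)))).foldl
          (fun acc ip => acc ++ [ip.2 ++ pvFooter title (ip.1 + 1)]) []
        ++ [PySem.List.pyGetD parts (-1) []]))

-- ===== PORT B =====
-- the while-loop of Source B: state (out, page, rest); fuel bounds the iteration count
def pvScanB (title : String) : Nat → List Char → Int → List Char → List Char
  | 0, out, _, rest => out ++ rest          -- fuel guard, never reached from fuel = |rest| + 1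
  | fuel + 1, out, page, rest =>
    let i := PySem.Chars.find rest pvPB
    if i = -1 then out ++ rest
    else pvScanB title fuel
        (out ++ PySem.List.slice rest none (some i) ++ pvFooter title (page + 1))
        (page + 1)
        (PySem.List.slice rest (some (i + (pvPB.length : Int))) none)

def inject_page_footers_py_alt (rendered : String) (title : String) : String :=
  String.ofList (pvScanB title (rendered.toList.length + 1) [] 0 rendered.toList)

-- ===== PRECONDITION & SPEC =====
def Spec_inject_page_footers_py (rendered : String) (title : String) (out : String) : Prop := out = inject_page_footers_py_alt rendered title
instance (rendered : String) (title : String) (out : String) : Decidable (Spec_inject_page_footers_py rendered title out) := by unfold Spec_inject_page_footers_py; infer_instance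

-- ===== CLAIM (what is proved, stated in full; the proofs are below) =====
def Claim_equal_inject_page_footers_py : Prop := ∀ (rendered : String) (title : String), Dom_inject_page_footers_py rendered title → Spec_inject_page_footers_py rendered title (inject_page_footers_py rendered title)

-- ===== LEMMAS AND PROOFS =====

theorem pvPB_ne_nil : pvPB ≠ [] := by decide

-- equations of splitOn.go specialised to sep = pvPB
theorem go_zero (l cur : List Char) (acc : List (List Char)) :
    PySem.Chars.splitOn.go pvPB 0 l cur acc = acc.reverse ++ [cur.reverse ++ l] := by
  rw [PySem.Chars.splitOn.go]; simp

theorem go_nil (fuel : Nat) (cur : List Char) (acc : List (List Char)) :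
    PySem.Chars.splitOn.go pvPB (fuel+1) [] cur acc = acc.reverse ++ [cur.reverse] := by
  rw [PySem.Chars.splitOn.go]; simp; omega

theorem go_pos (fuel : Nat) (c : Char) (rest cur : List Char) (acc : List (List Char))
    (h : pvPB.isPrefixOf (c :: rest)) :
    PySem.Chars.splitOn.go pvPB (fuel+1) (c :: rest) cur acc
      = PySem.Chars.splitOn.go pvPB fuel ((c :: rest).drop pvPB.length) [] (cur.reverse :: acc) := by
  rw [PySem.Chars.splitOn.go]; simp [h]

theorem go_neg (fuel : Nat) (c : Char) (rest cur : List Char) (acc : List (List Char))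
    (h : ¬ pvPB.isPrefixOf (c :: rest)) :
    PySem.Chars.splitOn.go pvPB (fuel+1) (c :: rest) cur acc
      = PySem.Chars.splitOn.go pvPB fuel rest (c :: cur) acc := by
  rw [PySem.Chars.splitOn.go]; simp [h]

-- accumulator-elimination for go
theorem go_acc (fuel : Nat) (l cur : List Char) (acc : List (List Char)) :
    PySem.Chars.splitOn.go pvPB fuel l cur acc
      = acc.reverse ++ (PySem.Chars.splitOn.go pvPB fuel l [] []).modifyHead (cur.reverse ++ ·) := by
  induction fuel generalizing l cur acc with
  | zero => simp [go_zero]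
  | succ fuel ih =>
    cases l with
    | nil => simp [go_nil]
    | cons c rest =>
      by_cases h : pvPB.isPrefixOf (c :: rest)
      · rw [go_pos _ _ _ _ _ h, go_pos _ _ _ _ _ h]
        rw [ih _ [] (cur.reverse :: acc), ih _ [] [[].reverse]]
        simp
      · rw [go_neg _ _ _ _ _ h, go_neg _ _ _ _ _ h, ih _ (c::cur) acc, ih _ [c] []]
        simp [List.modifyHead_modifyHead]
        cases (PySem.Chars.splitOn.go pvPB fuel rest [] []) <;> simp

-- gs fuel l = go with empty accumulators (the pure splitter)
def pvGs (fuel : Nat) (l : List Char) : List (List Char) :=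
  PySem.Chars.splitOn.go pvPB fuel l [] []

theorem gs_zero (l : List Char) : pvGs 0 l = [l] := by simp [pvGs, go_zero]

theorem gs_nil (fuel : Nat) : pvGs (fuel+1) [] = [[]] := by simp [pvGs, go_nil]

theorem gs_pos (fuel : Nat) (c : Char) (rest : List Char) (h : pvPB.isPrefixOf (c :: rest)) :
    pvGs (fuel+1) (c :: rest) = [] :: pvGs fuel ((c :: rest).drop pvPB.length) := by
  unfold pvGs
  rw [go_pos _ _ _ _ _ h, go_acc]
  cases PySem.Chars.splitOn.go pvPB fuel ((c :: rest).drop pvPB.length) [] [] <;> simp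

theorem gs_neg (fuel : Nat) (c : Char) (rest : List Char) (h : ¬ pvPB.isPrefixOf (c :: rest)) :
    pvGs (fuel+1) (c :: rest) = (pvGs fuel rest).modifyHead (c :: ·) := by
  unfold pvGs
  rw [go_neg _ _ _ _ _ h, go_acc]
  simp

theorem gs_ne_nil (fuel : Nat) : ∀ (l : List Char), pvGs fuel l ≠ [] := by
  induction fuel with
  | zero => intro l; simp [gs_zero]
  | succ fuel ih =>
    intro l
    cases l with
    | nil => simp [gs_nil]
    | cons c rest =>
      by_cases h : pvPB.isPrefixOf (c :: rest)
      · simp [gs_pos _ _ _ h]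
      · rw [gs_neg _ _ _ h]
        cases hE : pvGs fuel rest with
        | nil => exact absurd hE (ih rest)
        | cons a as => simp

-- fuel irrelevance: any fuel above the length computes the same split
theorem gs_fuel (fuel : Nat) : ∀ (fuel' : Nat) (l : List Char),
    l.length < fuel → l.length < fuel' → pvGs fuel l = pvGs fuel' l := by
  induction fuel with
  | zero => intro fuel' l h _; omega
  | succ fuel ih =>
    intro fuel' l h h'
    cases fuel' with
    | zero => omega
    | succ fuel' =>
      cases l with
      | nil => rw [gs_nil, gs_nil]
      | cons c rest =>
        have hk : 1 ≤ pvPB.length := by decide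
        by_cases hp : pvPB.isPrefixOf (c :: rest)
        · rw [gs_pos _ _ _ hp, gs_pos _ _ _ hp]
          have hd : ((c :: rest).drop pvPB.length).length ≤ rest.length := by
            simp; omega
          simp only [List.length_cons] at h h'
          rw [ih fuel' _ (by omega) (by omega)]
        · rw [gs_neg _ _ _ hp, gs_neg _ _ _ hp]
          simp only [List.length_cons] at h h'
          rw [ih fuel' rest (by omega) (by omega)]

-- the canonical split of l
def pvSplit (l : List Char) : List (List Char) := pvGs (l.length + 1) l

theorem pvSplit_ne_nil (l : List Char) : pvSplit l ≠ [] := gs_ne_nil _ _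

-- splitOn IS pvSplit
theorem splitOn_eq_pvSplit (l : List Char) : PySem.Chars.splitOn l pvPB = pvSplit l := rfl

-- find = n from a first-occurrence certificate
theorem find_eq_of (l : List Char) (n : Nat) (hocc : pvPB <+: l.drop n)
    (hmin : ∀ i < n, ¬ pvPB <+: l.drop i) : PySem.Chars.find l pvPB = (n : Int) := by
  have hinf : pvPB <:+: l := by
    obtain ⟨t, ht⟩ := hocc
    exact ⟨l.take n, t, by rw [List.append_assoc, ht, List.take_append_drop]⟩
  have h0 : 0 ≤ PySem.Chars.find l pvPB := (PySem.Chars.find_nonneg_iff _ _).mpr hinf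
  obtain ⟨hp, hm⟩ := PySem.Chars.find_spec h0
  have : (PySem.Chars.find l pvPB).toNat = n := by
    by_contra hne
    rcases Nat.lt_or_ge (PySem.Chars.find l pvPB).toNat n with hlt | hge
    · exact hmin _ hlt hp
    · exact hm n (by omega) hocc
  omega

theorem infix_cons_of_prefix_drop (c : Char) (rest : List Char) (j : Nat)
    (hj : pvPB <+: (c :: rest).drop j) (hj0 : j ≠ 0) : pvPB <:+: rest := by
  obtain ⟨k, rfl⟩ : ∃ k, j = k + 1 := ⟨j - 1, by omega⟩
  have : (c :: rest).drop (k + 1) = rest.drop k := rfl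
  rw [this] at hj
  obtain ⟨t, ht⟩ := hj
  obtain ⟨u, hu⟩ := List.drop_suffix k rest
  exact ⟨u, t, by rw [← hu, ← ht]; simp⟩

-- find on a cons without a match at position 0
theorem find_cons_neg (c : Char) (rest : List Char) (h : ¬ pvPB <+: (c :: rest)) :
    PySem.Chars.find (c :: rest) pvPB
      = if PySem.Chars.find rest pvPB = -1 then -1 else PySem.Chars.find rest pvPB + 1 := by
  by_cases hr : PySem.Chars.find rest pvPB = -1
  · rw [if_pos hr, PySem.Chars.find_eq_neg_one_iff]
    intro hinf
    have hIn : PySem.Chars.isIn pvPB (c :: rest) = true :=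
      (PySem.Chars.isIn_iff_infix _ _).mpr hinf
    obtain ⟨j, hj⟩ := (PySem.Chars.exists_prefix_drop_iff_isIn pvPB (c :: rest)).mpr hIn
    rcases Nat.eq_zero_or_pos j with rfl | hj0
    · exact h hj
    · exact ((PySem.Chars.find_eq_neg_one_iff rest pvPB).mp hr)
        (infix_cons_of_prefix_drop c rest j hj (by omega))
  · have h0 : 0 ≤ PySem.Chars.find rest pvPB := by
      have := PySem.Chars.neg_one_le_find rest pvPB; omega
    obtain ⟨hp, hm⟩ := PySem.Chars.find_spec h0
    rw [if_neg hr]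
    have := find_eq_of (c :: rest) ((PySem.Chars.find rest pvPB).toNat + 1)
      (by simpa using hp)
      (by
        intro i hi
        rcases Nat.eq_zero_or_pos i with rfl | hi0
        · exact h
        · obtain ⟨k, rfl⟩ : ∃ k, i = k + 1 := ⟨i - 1, by omega⟩
          exact hm k (by omega))
    rw [this]; omega

theorem find_nil_pb : PySem.Chars.find [] pvPB = -1 := by
  rw [PySem.Chars.find_eq_neg_one_iff]
  intro hinf
  exact pvPB_ne_nil (List.eq_nil_of_infix_nil hinf)

-- characterization of pvSplit by find (first occurrence splits off the head part)
theorem pvSplit_eq (l : List Char) :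
    pvSplit l = if PySem.Chars.find l pvPB = -1 then [l]
      else l.take (PySem.Chars.find l pvPB).toNat
        :: pvSplit (l.drop ((PySem.Chars.find l pvPB).toNat + pvPB.length)) := by
  induction l with
  | nil =>
    rw [if_pos find_nil_pb]
    exact gs_nil 0
  | cons c rest ih =>
    by_cases hp : pvPB.isPrefixOf (c :: rest)
    · have hpre : pvPB <+: (c :: rest) := List.isPrefixOf_iff_prefix.mp hp
      have hf : PySem.Chars.find (c :: rest) pvPB = ((0 : Nat) : Int) :=
        find_eq_of _ 0 (by simpa using hpre) (by intro i hi; omega)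
      rw [hf]
      rw [if_neg (by norm_num)]
      show pvGs ((c :: rest).length + 1) (c :: rest) = _
      rw [gs_pos _ _ _ hp]
      simp only [Int.toNat_natCast, List.take_zero, Nat.zero_add, List.cons.injEq, true_and]
      apply gs_fuel
      · have hk : 1 ≤ pvPB.length := by decide
        simp only [List.length_drop, List.length_cons]
        omega
      · omega
    · have hnp : ¬ pvPB <+: (c :: rest) := fun hh => hp (List.isPrefixOf_iff_prefix.mpr hh)
      have hstep := find_cons_neg c rest hnp
      show pvGs ((c :: rest).length + 1) (c :: rest) = _
      rw [List.length_cons, gs_neg _ _ _ hp]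
      have hrest : pvGs (rest.length + 1) rest = pvSplit rest := rfl
      rw [hrest, ih]
      by_cases hr : PySem.Chars.find rest pvPB = -1
      · rw [if_pos hr] at hstep
        rw [if_pos hr, hstep]
        simp
      · have h0 : 0 ≤ PySem.Chars.find rest pvPB := by
          have := PySem.Chars.neg_one_le_find rest pvPB; omega
        rw [if_neg hr] at hstep
        rw [if_neg hr, hstep, if_neg (by omega)]
        have ht : (PySem.Chars.find rest pvPB + 1).toNat
            = (PySem.Chars.find rest pvPB).toNat + 1 := by omega
        rw [ht]
        simp only [List.modifyHead, List.take_succ_cons, List.cons.injEq, true_and]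
        have h2 : (PySem.Chars.find rest pvPB).toNat + 1 + pvPB.length
            = ((PySem.Chars.find rest pvPB).toNat + pvPB.length) + 1 := by omega
        rw [h2, List.drop_succ_cons]

-- page-numbered reassembly of a parts list (footer p between part p and the next)
def pvGlue (title : String) : List (List Char) → Int → List Char
  | [], _ => []
  | [x], _ => x
  | x :: y :: ys, p => x ++ pvFooter title p ++ pvGlue title (y :: ys) (p + 1)

theorem join_empty_cons (p : List Char) (L : List (List Char)) (h : L ≠ []) :
    PySem.Chars.join [] (p :: L) = p ++ PySem.Chars.join [] L := by
  cases L with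
  | nil => exact absurd rfl h
  | cons q r => rw [PySem.Chars.join_cons_cons]; simp

-- B's scan computes out ++ glue of the split
theorem scanB_glue (title : String) (fuel : Nat) :
    ∀ (rest out : List Char) (page : Int), rest.length < fuel →
    pvScanB title fuel out page rest = out ++ pvGlue title (pvSplit rest) (page + 1) := by
  induction fuel with
  | zero => intro rest out page h; omega
  | succ fuel ih =>
    intro rest out page h
    by_cases hf : PySem.Chars.find rest pvPB = -1
    · rw [pvScanB]
      simp only [hf, if_pos]
      rw [pvSplit_eq, if_pos hf]
      rfl
    · have h0 : 0 ≤ PySem.Chars.find rest pvPB := by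
        have := PySem.Chars.neg_one_le_find rest pvPB; omega
      have hll := PySem.Chars.find_le_length rest pvPB
      have hrne : rest ≠ [] := by
        intro hnil; rw [hnil, find_nil_pb] at hf; exact hf rfl
      have hk : 1 ≤ pvPB.length := by decide
      rw [pvScanB]
      simp only [hf, ite_false]
      rw [PySem.List.slice_to _ h0, PySem.List.slice_from _ (by omega)]
      have htn : (PySem.Chars.find rest pvPB + (pvPB.length : Int)).toNat
          = (PySem.Chars.find rest pvPB).toNat + pvPB.length := by omega
      rw [htn]
      have hdl : (rest.drop ((PySem.Chars.find rest pvPB).toNat + pvPB.length)).length < fuel := by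
        have h1 : 1 ≤ rest.length := by cases rest with
          | nil => exact absurd rfl hrne
          | cons => simp
        simp only [List.length_drop]
        omega
      rw [ih _ _ _ hdl]
      rw [pvSplit_eq rest, if_neg hf]
      obtain ⟨y, ys, hys⟩ : ∃ y ys, pvSplit (rest.drop ((PySem.Chars.find rest pvPB).toNat + pvPB.length)) = y :: ys := by
        cases hsp : pvSplit (rest.drop ((PySem.Chars.find rest pvPB).toNat + pvPB.length)) with
        | nil => exact absurd hsp (pvSplit_ne_nil _)
        | cons y ys => exact ⟨y, ys, rfl⟩
      rw [hys]
      show _ = out ++ pvGlue title (_ :: y :: ys) (page + 1)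
      rw [pvGlue]
      simp only [List.append_assoc]

-- A's enumerate/foldl/join computes glue too
theorem join_glue (title : String) (parts : List (List Char)) :
    ∀ (h : parts ≠ []) (s : Int),
    PySem.Chars.join []
        ((PySem.List.enumerate parts.dropLast s).map (fun ip => ip.2 ++ pvFooter title (ip.1 + 1))
          ++ [parts.getLast h])
      = pvGlue title parts (s + 1) := by
  induction parts with
  | nil => intro h; exact absurd rfl h
  | cons x xs ih =>
    intro h s
    cases xs with
    | nil =>
      simp [PySem.List.enumerate_nil, PySem.Chars.join_singleton, pvGlue]
    | cons y ys =>
      have hyne : (y :: ys) ≠ [] := by simp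
      rw [List.dropLast_cons_of_ne_nil hyne, PySem.List.enumerate_cons, List.map_cons]
      rw [List.cons_append, join_empty_cons _ _ (by simp)]
      rw [List.getLast_cons hyne]
      rw [ih hyne (s + 1)]
      show _ = pvGlue title (x :: y :: ys) (s + 1)
      rw [pvGlue]

-- a singleton split is the whole string
theorem pvSplit_singleton (l x : List Char) (h : pvSplit l = [x]) : x = l := by
  rw [pvSplit_eq] at h
  split_ifs at h with hf
  · exact (List.cons.injEq .. ▸ h).1.symm
  · exfalso
    have := (List.cons.injEq .. ▸ h).2
    exact pvSplit_ne_nil _ this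

-- ===== VERDICT (by name: the statement is the Claim_ definition above) =====
theorem inject_page_footers_py_spec : Claim_equal_inject_page_footers_py := by
  intro rendered title _
  unfold Spec_inject_page_footers_py
  simp only [inject_page_footers_py, inject_page_footers_py_alt]
  rw [scanB_glue title _ _ _ _ (by omega)]
  rw [splitOn_eq_pvSplit]
  by_cases hlen : (pvSplit rendered.toList).length ≤ 1
  · rw [if_pos hlen]
    obtain ⟨x, hx⟩ : ∃ x, pvSplit rendered.toList = [x] := by
      cases hsp : pvSplit rendered.toList with
      | nil => exact absurd hsp (pvSplit_ne_nil _)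
      | cons a as =>
        cases as with
        | nil => exact ⟨a, rfl⟩
        | cons b bs => rw [hsp] at hlen; simp at hlen
    rw [hx]
    have hxl : x = rendered.toList := pvSplit_singleton _ _ hx
    rw [hxl]
    show rendered = String.ofList ([] ++ pvGlue title [rendered.toList] (0 + 1))
    rw [pvGlue]
    simp [String.ofList_toList]
  · rw [if_neg hlen]
    have hne : pvSplit rendered.toList ≠ [] := pvSplit_ne_nil _
    rw [PySem.List.foldl_append_singleton_eq_map
      (fun ip : Int × List Char => ip.2 ++ pvFooter title (ip.1 + 1))]
    rw [PySem.List.slice_to_neg_one, PySem.List.pyGetD_neg_one _ _ hne]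
    rw [List.nil_append, join_glue title _ hne 0]
    simp
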